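-- pv_equiv track=rewrite | github.com/igor53627/shitposter | tests/test_e2e.py | extract_key_from_output
-- ===== SOURCE A (Python) =====
-- def extract_key_from_output(stdout):
--     # 1. Try dash separators (keygen output)
--     if "--------" in stdout:
--         lines = stdout.splitlines()
--         key_lines = []
--         capture = False
--         for line in lines:
--             if "--------" in line:
--                 if capture: break
--                 else: capture = True; continue
--             if capture: key_lines.append(line.strip())
--         return " ".join(key_lines).strip()
--
--     # 2. Fallback: Assume the last non-empty line is the key (util output)
--     lines = [l.strip() for l in stdout.splitlines() if l.strip()]
--     if lines:
--         return lines[-1]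
--     return ""
-- ===== SOURCE B (Python) =====
-- def extract_key_from_output(stdout):
--     # 1. Dash separators (keygen output): locate marker-line indices, then slice.
--     if "--------" in stdout:
--         lines = stdout.splitlines()
--         marks = [i for i, line in enumerate(lines) if "--------" in line]
--         if not marks:
--             return ""
--         stop = marks[1] if len(marks) > 1 else len(lines)
--         seg = lines[marks[0] + 1 : stop]
--         return " ".join(line.strip() for line in seg).strip()
--     # 2. Fallback: last non-empty stripped line.
--     stripped = [line.strip() for line in stdout.splitlines() if line.strip()]
--     return stripped[-1] if stripped else ""
-- ===== Notes on version B (the rewrite author's own statement) =====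
-- stated objective: alternative
-- what changed: Replaces the stateful capture-flag/break scan of the separator branch with an index-then-slice decomposition: collect the indices of separator lines once, slice the segment between the first and second marker, then strip-join it; the fallback branch becomes a single conditional expression over the stripped non-empty lines.
import Mathlib
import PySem

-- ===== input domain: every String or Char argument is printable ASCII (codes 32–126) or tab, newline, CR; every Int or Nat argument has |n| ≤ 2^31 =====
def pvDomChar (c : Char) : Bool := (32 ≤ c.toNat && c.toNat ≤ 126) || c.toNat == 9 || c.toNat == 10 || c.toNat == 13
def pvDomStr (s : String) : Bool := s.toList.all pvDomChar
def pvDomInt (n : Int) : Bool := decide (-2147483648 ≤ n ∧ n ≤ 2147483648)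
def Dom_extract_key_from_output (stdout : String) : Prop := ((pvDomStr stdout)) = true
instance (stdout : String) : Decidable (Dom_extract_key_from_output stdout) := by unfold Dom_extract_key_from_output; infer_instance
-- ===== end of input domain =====

-- B replaces A's capture-flag/break scan by an index-then-slice decomposition (same cost, different shape); A = B everywhere.

-- shared helper: "--------" in line
def pvMark (line : String) : Bool := PySem.Str.isIn "--------" line

-- ===== PORT A =====
-- A's for-loop state: (key_lines, capture, broken-out-of-loop)
def pvStepA (st : List String × Bool × Bool) (line : String) : List String × Bool × Bool :=
  if st.2.2 then st
  else if pvMark line then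
    (if st.2.1 then (st.1, st.2.1, true) else (st.1, true, false))
  else if st.2.1 then (st.1 ++ [PySem.Str.strip line], st.2.1, st.2.2)
  else st

def extract_key_from_output (stdout : String) : String :=
  if PySem.Str.isIn "--------" stdout then
    let lines := PySem.Str.splitlines stdout
    let st := lines.foldl pvStepA (([], false, false) : List String × Bool × Bool)
    PySem.Str.strip (PySem.Str.join " " st.1)
  else
    let lines := ((PySem.Str.splitlines stdout).filter (fun l => !(PySem.Str.strip l == ""))).map PySem.Str.strip
    if !lines.isEmpty then
      match PySem.List.pyGet? lines (-1) with
      | some s => s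
      | none => ""
    else ""

-- ===== PORT B =====
def extract_key_from_output_alt (stdout : String) : String :=
  if PySem.Str.isIn "--------" stdout then
    let lines := PySem.Str.splitlines stdout
    let marks := (PySem.List.enumerate lines).filterMap
      (fun q => if pvMark q.2 then some q.1 else none)
    match marks with
    | [] => ""
    | i :: rest =>
      let stop : Int := match rest with | j :: _ => j | [] => (lines.length : Int)
      let seg := PySem.List.slice lines (some (i + 1)) (some stop)
      PySem.Str.strip (PySem.Str.join " " (seg.map PySem.Str.strip))
  else
    let stripped := ((PySem.Str.splitlines stdout).filter (fun l => !(PySem.Str.strip l == ""))).map PySem.Str.strip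
    if !stripped.isEmpty then
      match PySem.List.pyGet? stripped (-1) with
      | some s => s
      | none => ""
    else ""

-- ===== PRECONDITION & SPEC =====
def Spec_extract_key_from_output (stdout : String) (out : String) : Prop := out = extract_key_from_output_alt stdout
instance (stdout : String) (out : String) : Decidable (Spec_extract_key_from_output stdout out) := by unfold Spec_extract_key_from_output; infer_instance

-- ===== CLAIM (what is proved, stated in full; the proofs are below) =====
def Claim_equal_extract_key_from_output : Prop := ∀ (stdout : String), Dom_extract_key_from_output stdout → Spec_extract_key_from_output stdout (extract_key_from_output stdout)

-- ===== LEMMAS AND PROOFS =====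

-- indices (from 0) of the marker lines
def pvIdxs : List String → List Nat
  | [] => []
  | a :: t => if pvMark a then 0 :: (pvIdxs t).map (· + 1) else (pvIdxs t).map (· + 1)

theorem pvIdxs_nil_all (ls : List String) (h : pvIdxs ls = []) :
    ∀ a ∈ ls, pvMark a = false := by
  induction ls with
  | nil => simp
  | cons a t ih =>
    intro x hx
    by_cases hm : pvMark a
    · simp [pvIdxs, hm] at h
    · have ht : pvIdxs t = [] := by
        simpa [pvIdxs, hm, List.map_eq_nil_iff] using h
      rcases List.mem_cons.mp hx with rfl | hx
      · simpa using hm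
      · exact ih ht x hx

theorem pvIdxs_head_takeWhile (ls : List String) (k : Nat) (tl : List Nat)
    (h : pvIdxs ls = k :: tl) :
    ls.takeWhile (fun l => !pvMark l) = ls.take k := by
  induction ls generalizing k tl with
  | nil => simp [pvIdxs] at h
  | cons a t ih =>
    by_cases hm : pvMark a
    · simp [pvIdxs, hm] at h
      obtain ⟨rfl, -⟩ := h
      simp [hm]
    · simp [pvIdxs, hm] at h
      cases ht : pvIdxs t with
      | nil => rw [ht] at h; simp at h
      | cons k' tl' =>
        rw [ht] at h
        simp at h
        obtain ⟨rfl, -⟩ := h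
        simp [hm, ih k' tl' ht]

theorem pvFoldA_broken (ls : List String) (kls : List String) (c : Bool) :
    ls.foldl pvStepA (kls, c, true) = (kls, c, true) := by
  induction ls with
  | nil => rfl
  | cons a t ih => simp [List.foldl_cons, pvStepA, ih]

theorem pvFoldA_capture (ls : List String) (kls : List String) :
    ls.foldl pvStepA (kls, true, false) =
      (kls ++ (ls.takeWhile (fun l => !pvMark l)).map PySem.Str.strip, true, ls.any pvMark) := by
  induction ls generalizing kls with
  | nil => simp
  | cons a t ih =>
    by_cases hm : pvMark a
    · simp [List.foldl_cons, pvStepA, hm, pvFoldA_broken, List.any_cons]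
    · simp [List.foldl_cons, pvStepA, hm, ih, List.any_cons]

theorem pvEnumMarks (ls : List String) (s : Int) :
    (PySem.List.enumerate ls s).filterMap (fun q => if pvMark q.2 then some q.1 else none)
      = (pvIdxs ls).map (fun (k : Nat) => s + (k : Int)) := by
  induction ls generalizing s with
  | nil => simp [PySem.List.enumerate, pvIdxs]
  | cons a t ih =>
    rw [PySem.List.enumerate_cons, List.filterMap_cons]
    by_cases hm : pvMark a
    · simp only [hm, if_pos, pvIdxs, List.map_cons, List.map_map, ih]
      refine List.cons_eq_cons.mpr ⟨by simp, ?_⟩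
      apply List.map_congr_left
      intro k _
      simp only [Function.comp_apply]
      push_cast; ring
    · simp only [hm, pvIdxs, Bool.false_eq_true, if_false, List.map_map, ih]
      apply List.map_congr_left
      intro k _
      simp only [Function.comp_apply]
      push_cast; ring

theorem pvBranch1 (ls : List String) :
    (match (pvIdxs ls).map (fun (k : Nat) => (k : Int)) with
      | [] => ""
      | i :: rest =>
        let stop : Int := match rest with | j :: _ => j | [] => (ls.length : Int)
        let seg := PySem.List.slice ls (some (i + 1)) (some stop)
        PySem.Str.strip (PySem.Str.join " " (seg.map PySem.Str.strip)))
    = PySem.Str.strip (PySem.Str.join " " (ls.foldl pvStepA (([], false, false) : List String × Bool × Bool)).1) := by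
  induction ls with
  | nil => decide
  | cons a t ih =>
    rw [List.foldl_cons]
    by_cases hm : pvMark a
    · -- head is the first marker line: A switches to capture mode, B slices from index 1
      rw [show pvStepA ([], false, false) a = ([], true, false) by simp [pvStepA, hm]]
      rw [pvFoldA_capture]
      cases ht : pvIdxs t with
      | nil =>
        have htw : t.takeWhile (fun l => !pvMark l) = t := by
          rw [List.takeWhile_eq_self_iff]
          intro x hx; simp [pvIdxs_nil_all t ht x hx]
        simp only [pvIdxs, hm, if_true, ht, List.map_nil, List.map_cons]
        show PySem.Str.strip (PySem.Str.join " "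
            ((PySem.List.slice (a :: t) (some (((0 : Nat) : Int) + 1))
              (some (((a :: t).length : Nat) : Int))).map PySem.Str.strip)) = _
        rw [show (((0 : Nat) : Int) + 1) = ((1 : Nat) : Int) from rfl, PySem.List.slice_natCast]
        simp [htw]
      | cons k tl =>
        have htw := pvIdxs_head_takeWhile t k tl ht
        simp only [pvIdxs, hm, if_true, ht, List.map_cons]
        show PySem.Str.strip (PySem.Str.join " "
            ((PySem.List.slice (a :: t) (some (((0 : Nat) : Int) + 1))
              (some ((k + 1 : Nat) : Int))).map PySem.Str.strip)) = _
        rw [show (((0 : Nat) : Int) + 1) = ((1 : Nat) : Int) from rfl, PySem.List.slice_natCast]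
        simp [htw]
    · -- head is not a marker line and capture is off: both sides ignore it
      rw [show pvStepA ([], false, false) a = ([], false, false) by simp [pvStepA, hm]]
      rw [← ih]
      cases ht : pvIdxs t with
      | nil => simp [pvIdxs, hm, ht]
      | cons k tl =>
        simp only [pvIdxs, hm, Bool.false_eq_true, if_false, ht, List.map_cons, List.map_map]
        cases tl with
        | nil =>
          show PySem.Str.strip (PySem.Str.join " "
              ((PySem.List.slice (a :: t) (some (((k + 1 : Nat) : Int) + 1))
                (some (((a :: t).length : Nat) : Int))).map PySem.Str.strip))
            = PySem.Str.strip (PySem.Str.join " "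
              ((PySem.List.slice t (some (((k : Nat) : Int) + 1))
                (some ((t.length : Nat) : Int))).map PySem.Str.strip))
          rw [show (((k + 1 : Nat) : Int) + 1) = ((k + 2 : Nat) : Int) by push_cast; ring,
              show (((k : Nat) : Int) + 1) = ((k + 1 : Nat) : Int) by push_cast; ring,
              PySem.List.slice_natCast, PySem.List.slice_natCast]
          have harith : (a :: t).length - (k + 2) = t.length - (k + 1) := by
            simp [List.length_cons]
          rw [harith, List.drop_succ_cons]
        | cons j tl' =>
          show PySem.Str.strip (PySem.Str.join " "
              ((PySem.List.slice (a :: t) (some (((k + 1 : Nat) : Int) + 1))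
                (some ((j + 1 : Nat) : Int))).map PySem.Str.strip))
            = PySem.Str.strip (PySem.Str.join " "
              ((PySem.List.slice t (some (((k : Nat) : Int) + 1))
                (some ((j : Nat) : Int))).map PySem.Str.strip))
          rw [show (((k + 1 : Nat) : Int) + 1) = ((k + 2 : Nat) : Int) by push_cast; ring,
              show (((k : Nat) : Int) + 1) = ((k + 1 : Nat) : Int) by push_cast; ring,
              PySem.List.slice_natCast, PySem.List.slice_natCast]
          have harith : (j + 1) - (k + 2) = j - (k + 1) := by omega
          rw [harith, List.drop_succ_cons]

-- ===== VERDICT (by name: the statement is the Claim_ definition above) =====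
theorem extract_key_from_output_spec : Claim_equal_extract_key_from_output := by
  intro stdout _
  unfold Spec_extract_key_from_output extract_key_from_output extract_key_from_output_alt
  by_cases h : PySem.Str.isIn "--------" stdout
  · simp only [h, if_pos]
    rw [pvEnumMarks]
    have hmap : (pvIdxs (PySem.Str.splitlines stdout)).map (fun (k : Nat) => (0 : Int) + (k : Int))
        = (pvIdxs (PySem.Str.splitlines stdout)).map (fun (k : Nat) => (k : Int)) :=
      List.map_congr_left (fun k _ => by omega)
    rw [hmap]
    exact (pvBranch1 (PySem.Str.splitlines stdout)).symm
  · simp only [h, if_neg, Bool.false_eq_true, not_false_iff]
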